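-- pv_equiv track=rewrite | github.com/CrazyDubya/Taverna | living_rusted_tankard/core/reputation.py | get_reputation_tier
-- ===== SOURCE A (Python) =====
-- MIN_REPUTATION = -100
--
-- MAX_REPUTATION = 100
--
-- REPUTATION_TIERS = [
--     (-101, "Despised"),  # Should not happen if clamped
--     (-75, "Hated"),
--     (-50, "Disliked"),
--     (-25, "Unfriendly"),
--     (0, "Neutral"),
--     (25, "Friendly"),
--     (50, "Liked"),
--     (75, "Trusted"),
--     (101, "Hero"),  # Should not happen if clamped
-- ]
--
-- def get_reputation_tier(score: int) -> str:
--     """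
--     Translates a numerical reputation score into a descriptive tier name.
--     """
--     # Ensure score is clamped for tier lookup, though update_reputation should handle clamping.
--     score = max(MIN_REPUTATION, min(MAX_REPUTATION, score))
--
--     if score == 0:
--         return "Neutral"
--
--     # Iterate upwards for positive scores
--     if score > 0:
--         for threshold, name in reversed(REPUTATION_TIERS):
--             if name in ["Neutral", "Unfriendly", "Disliked", "Hated", "Despised"]:  # Skip negative tiers
--                 continue
--             if score >= threshold:  # This logic is a bit off for threshold based.
--                 # Let's use the REPUTATION_TIER_MAP ranges.
--                 pass  # Placeholder, will fix below
--
--     # Corrected logic using REPUTATION_TIER_MAP approach (conceptual)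
--     # For simplicity, let's use the provided REPUTATION_TIERS list properly.
--     # Iterate from highest tier downwards.
--
--     # If score is exactly 0, it's Neutral
--     if score == 0:
--         return "Neutral"
--
--     # For positive scores, iterate from high to low (excluding Neutral and below)
--     if score > 0:
--         for i in range(len(REPUTATION_TIERS) - 1, -1, -1):
--             threshold, name = REPUTATION_TIERS[i]
--             if name in ["Neutral", "Unfriendly", "Disliked", "Hated", "Despised"]:
--                 continue
--             if score >= threshold:
--                 return name
--
--     # For negative scores, iterate from low to high (excluding Neutral and above)
--     if score < 0:
--         for threshold, name in REPUTATION_TIERS: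
--             if name in ["Neutral", "Friendly", "Liked", "Trusted", "Hero"]:
--                 continue
--             # For negative tiers, the score should be less than or equal to the tier's upper bound.
--             # E.g., Hated is -75. If score is -75 or -80, it's Hated.
--             # The REPUTATION_TIERS list is (threshold, name), meaning score >= threshold.
--             # For negative, we want the "highest" negative tier they qualify for.
--             # Example: score = -60. Disliked (-50), Unfriendly (-25). It's Disliked.
--             # This means we find the *last* tier in the sorted list whose threshold is <= score.
--             # Or, iterate upwards:
--
--             # Corrected logic for negative scores
--             # Find the tier that this score falls into.
--             # E.g. score -60. Hated is -75, Disliked is -50. It's Disliked.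
--             # The current REPUTATION_TIERS is threshold to be >=
--             # So, for -60:
--             # - Despised (-101): -60 >= -101 (True)
--             # - Hated (-75): -60 >= -75 (True)
--             # - Disliked (-50): -60 >= -50 (False) -> So it was Hated. This is correct.
--
--             # Let's re-verify the iteration for negative scores.
--             # We want the "worst" tier they qualify for.
--             # Iterate from "Despised" upwards. The last one they meet or exceed is their tier.
--             selected_tier = "Unknown"  # Should not happen
--             for threshold, name in REPUTATION_TIERS:
--                 if name in ["Neutral", "Friendly", "Liked", "Trusted", "Hero"]:
--                     continue  # Only consider negative tiers
--                 if score >= threshold: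
--                     selected_tier = name
--                 else:  # If score is less than this threshold, they can't be in higher negative tiers
--                     break
--             return selected_tier
--
--     # Fallback, though logic above should cover clamped scores.
--     return "Neutral"  # Default fallback if no tier is matched (e.g. exactly 0 if not caught)
-- ===== SOURCE B (Python) =====
-- _CUTS = [-75, -50, -25, 0, 25, 50, 75]
-- _NAMES = ["Despised", "Hated", "Disliked", "Unfriendly",
--           "Neutral", "Friendly", "Liked", "Trusted"]
--
-- def get_reputation_tier(score: int) -> str:
--     """Translates a numerical reputation score into a descriptive tier name."""
--     score = max(-100, min(100, score))
--     # binary search: first index with score < _CUTS[index] (bisect_right)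
--     lo, hi = 0, len(_CUTS)
--     while lo < hi:
--         mid = (lo + hi) // 2
--         if score < _CUTS[mid]:
--             hi = mid
--         else:
--             lo = mid + 1
--     return _NAMES[lo]
-- ===== Notes on version B (the rewrite author's own statement) =====
-- stated objective: idiomatic
-- what changed: Replaced A's two directional linear scans with continue/break over the tier list (plus a dead placeholder loop) by a single hand-written bisect_right binary search over a sorted cut-point table.
import Mathlib
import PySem

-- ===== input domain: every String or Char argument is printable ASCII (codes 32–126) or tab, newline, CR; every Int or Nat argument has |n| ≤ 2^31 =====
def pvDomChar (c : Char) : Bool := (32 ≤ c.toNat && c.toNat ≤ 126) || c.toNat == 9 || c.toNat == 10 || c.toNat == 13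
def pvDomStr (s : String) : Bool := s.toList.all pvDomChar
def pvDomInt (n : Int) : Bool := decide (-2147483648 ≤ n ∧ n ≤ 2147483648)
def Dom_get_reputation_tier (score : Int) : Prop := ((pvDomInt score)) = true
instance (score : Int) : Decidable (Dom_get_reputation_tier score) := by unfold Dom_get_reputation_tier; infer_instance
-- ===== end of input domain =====

-- B replaces A's two directional linear scans over the tier list by a single
-- hand-written binary search (bisect_right) over a sorted cut-point table (objective: idiomatic).

-- ===== PORT A =====
def REPUTATION_TIERS : List (Int × String) :=
  [(-101, "Despised"), (-75, "Hated"), (-50, "Disliked"), (-25, "Unfriendly"),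
   (0, "Neutral"), (25, "Friendly"), (50, "Liked"), (75, "Trusted"), (101, "Hero")]

-- positive-score loop: for i in range(len-1,-1,-1): skip negative tiers; return name if score >= threshold
def pvPosLoop (score : Int) : List Int → Option String
  | [] => none
  | i :: rest =>
    let (threshold, name) := REPUTATION_TIERS.getD i.toNat (0, "")
    if ["Neutral", "Unfriendly", "Disliked", "Hated", "Despised"].contains name then
      pvPosLoop score rest
    else if score ≥ threshold then some name
    else pvPosLoop score rest

-- inner negative-score loop: keep the last negative tier whose threshold the score meets; break otherwise
def pvNegInner (score : Int) (selected : String) : List (Int × String) → String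
  | [] => selected
  | (threshold, name) :: rest =>
    if ["Neutral", "Friendly", "Liked", "Trusted", "Hero"].contains name then
      pvNegInner score selected rest
    else if score ≥ threshold then pvNegInner score name rest
    else selected

-- outer negative-score loop: first non-skipped tier runs the inner loop and returns its result
def pvNegOuter (score : Int) : List (Int × String) → Option String
  | [] => none
  | (_, name) :: rest =>
    if ["Neutral", "Friendly", "Liked", "Trusted", "Hero"].contains name then
      pvNegOuter score rest
    else some (pvNegInner score "Unknown" REPUTATION_TIERS)

-- body of A after the reassignment 'score = max(MIN, min(MAX, score))'
-- (the first 'if score > 0' loop in A only executes 'continue'/'pass' and returns nothing: no-op)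
def pvACore (score : Int) : String :=
  if score = 0 then "Neutral"
  else if score = 0 then "Neutral"
  else
    match (if score > 0 then pvPosLoop score (PySem.List.pyRange 8 (-1) (-1)) else none) with
    | some name => name
    | none =>
      if score < 0 then (pvNegOuter score REPUTATION_TIERS).getD "Neutral"
      else "Neutral"

def get_reputation_tier (score : Int) : String :=
  pvACore (max (-100) (min 100 score))

-- ===== PORT B =====
def pvCuts : List Int := [-75, -50, -25, 0, 25, 50, 75]
def pvNames : List String :=
  ["Despised", "Hated", "Disliked", "Unfriendly", "Neutral", "Friendly", "Liked", "Trusted"]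

-- the while-loop of Source B: binary search for the first index with score < cuts[index];
-- fuel = hi - lo bounds the iteration count (the interval halves each step, so 7 is enough)
def pvBisect (score : Int) : Nat → Nat → Nat → Nat
  | 0, lo, _ => lo
  | fuel + 1, lo, hi =>
    if lo < hi then
      let mid := (lo + hi) / 2
      if score < pvCuts.getD mid 0 then pvBisect score fuel lo mid
      else pvBisect score fuel (mid + 1) hi
    else lo

def pvBCore (score : Int) : String :=
  pvNames.getD (pvBisect score 7 0 7) ""

def get_reputation_tier_alt (score : Int) : String :=
  pvBCore (max (-100) (min 100 score))

-- ===== PRECONDITION & SPEC =====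
def Spec_get_reputation_tier (score : Int) (out : String) : Prop := out = get_reputation_tier_alt score
instance (score : Int) (out : String) : Decidable (Spec_get_reputation_tier score out) := by unfold Spec_get_reputation_tier; infer_instance

-- ===== CLAIM (what is proved, stated in full; the proofs are below) =====
def Claim_equal_get_reputation_tier : Prop := ∀ (score : Int), Dom_get_reputation_tier score → Spec_get_reputation_tier score (get_reputation_tier score)

-- ===== LEMMAS AND PROOFS =====
theorem pvCore_eq (c : Int) (h1 : -100 ≤ c) (h2 : c ≤ 100) : pvACore c = pvBCore c := by
  interval_cases c <;> rfl

-- ===== VERDICT (by name: the statement is the Claim_ definition above) =====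
theorem get_reputation_tier_spec : Claim_equal_get_reputation_tier := by
  intro score _
  unfold Spec_get_reputation_tier get_reputation_tier get_reputation_tier_alt
  exact pvCore_eq _ (by omega) (by omega)
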